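-- pv_equiv track=rewrite | github.com/hshziwo/Python-Team-Notes | 이진탐색/입국심사 오답.py | solution
-- ===== SOURCE A (Python) =====
-- def solution(n, times):
--     def binary_search(start, end) :
--         if start >= end :
--             return start
--         mid = (start + end) // 2
--         value = sum([mid // x for x in times])
--         if n == value :
--             return mid
--         elif n > value :
--             # 덜 처리됨
--             # mid 오른쪽에서 시작
--             return binary_search(mid+1, end)
--         else :
--             # 더 처리됨
--             # mid 왼쪽까지 처리
--             return binary_search(start, mid-1)
--     answer = binary_search(0, 1000000000)
--     return answer
-- ===== SOURCE B (Python) =====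
-- def solution(n, times):
--     # Iterative binary search carrying (start, length) instead of (start, end),
--     # with the per-step sum taken over the distinct times and their counts.
--     counts = {}
--     for x in times:
--         counts[x] = counts.get(x, 0) + 1
--     items = list(counts.items())
--     start, length = 0, 1000000000
--     while length > 0:
--         half = length // 2
--         mid = start + half
--         value = sum((mid // t) * c for t, c in items)
--         if value == n:
--             return mid
--         if value < n:
--             start = mid + 1
--             length = length - half - 1
--         else:
--             length = half - 1
--     return start
-- ===== Notes on version B (the rewrite author's own statement) =====
-- stated objective: alternative
-- what changed: The recursive (start,end) binary_search becomes an iterative loop over a (start,length) state with mid = start + length//2, and the per-step sum over all of times is replaced by a sum over the distinct times with their multiplicities, counted once before the search.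
import Mathlib
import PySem

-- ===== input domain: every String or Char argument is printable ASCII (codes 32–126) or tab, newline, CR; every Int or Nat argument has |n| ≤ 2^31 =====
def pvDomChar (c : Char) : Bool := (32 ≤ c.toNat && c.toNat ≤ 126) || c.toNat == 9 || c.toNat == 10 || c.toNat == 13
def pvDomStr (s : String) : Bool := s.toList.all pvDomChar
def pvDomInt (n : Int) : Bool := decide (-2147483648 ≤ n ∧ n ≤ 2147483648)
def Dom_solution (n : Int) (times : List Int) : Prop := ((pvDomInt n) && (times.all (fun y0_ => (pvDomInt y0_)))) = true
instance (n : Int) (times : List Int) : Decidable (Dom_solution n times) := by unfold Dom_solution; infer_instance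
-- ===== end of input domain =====

-- B replaces the recursive (start,end) binary search by an iterative loop over a
-- (start,length) state, summing over a dict of distinct times with multiplicities built once.


-- ===== PORT A =====
-- the inner recursive binary_search of A, step for step
def solutionBS (n : Int) (times : List Int) (start fin : Int) : Int :=
  if start ≥ fin then start
  else
    let mid := PySem.Int.floordiv (start + fin) 2
    let value := (times.map (fun x => PySem.Int.floordiv mid x)).sum
    if n = value then mid
    else if n > value then solutionBS n times (mid + 1) fin
    else solutionBS n times start (mid - 1)
termination_by (fin - start).toNat
decreasing_by
  · have h1 : start ≤ PySem.Int.floordiv (start + fin) 2 :=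
      (PySem.Int.floordiv_two_mid_bounds (by omega)).1
    omega
  · have h2 : PySem.Int.floordiv (start + fin) 2 < fin := by
      rw [PySem.Int.floordiv_lt_iff_lt_mul (by omega)]; omega
    omega

def solution (n : Int) (times : List Int) : Int :=
  solutionBS n times 0 1000000000

-- ===== PORT B =====
-- counts = {}; for x in times: counts[x] = counts.get(x, 0) + 1
def altCounts (times : List Int) : PySem.Dict Int Int :=
  times.foldl (fun d x => d.insert x (d.getD x 0 + 1)) PySem.Dict.empty

-- value = sum((mid // t) * c for t, c in items)
def altValue (mid : Int) (items : List (Int × Int)) : Int :=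
  (items.map (fun p => PySem.Int.floordiv mid p.1 * p.2)).sum

-- the 'while length > 0' loop, transcribed with a Nat fuel; the interval length strictly
-- shrinks each iteration, so a fuel equal to the initial length makes this exact.
def altGo (n : Int) (items : List (Int × Int)) : Nat → Int → Int → Int
  | 0, start, _ => start
  | fuel + 1, start, length =>
    if 0 < length then
      let half := PySem.Int.floordiv length 2
      let mid := start + half
      let value := altValue mid items
      if value = n then mid
      else if value < n then altGo n items fuel (mid + 1) (length - half - 1)
      else altGo n items fuel start (half - 1)
    else start

def solution_alt (n : Int) (times : List Int) : Int :=
  altGo n (altCounts times).items 1000000000 0 1000000000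

-- ===== PRECONDITION & SPEC =====
-- Pre_ excludes exactly the inputs where Python A raises ZeroDivisionError (0 in times).
def Pre_solution (n : Int) (times : List Int) : Prop := (0 : Int) ∉ times
instance (n : Int) (times : List Int) : Decidable (Pre_solution n times) := by
  unfold Pre_solution; infer_instance
def pvWitness_solution : Int × List Int := (6, [7, 10])

def Spec_solution (n : Int) (times : List Int) (out : Int) : Prop := out = solution_alt n times
instance (n : Int) (times : List Int) (out : Int) : Decidable (Spec_solution n times out) := by
  unfold Spec_solution; infer_instance

-- ===== CLAIM (what is proved, stated in full; the proofs are below) =====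
def Claim_equal_solution : Prop := ∀ (n : Int) (times : List Int), Dom_solution n times → Pre_solution n times → Spec_solution n times (solution n times)

-- ===== LEMMAS AND PROOFS =====

-- summing f over a single marked element of a Nodup list
theorem sum_ite_single (f : Int → Int) (x : Int) :
    ∀ (S : List Int), S.Nodup → x ∈ S →
      (S.map (fun k => f k * (if k = x then 1 else 0))).sum = f x := by
  intro S
  induction S with
  | nil => simp
  | cons a S ih =>
    intro hnd hmem
    simp only [List.map_cons, List.sum_cons]
    rcases List.mem_cons.mp hmem with h | h
    · subst h
      have hxS : x ∉ S := (List.nodup_cons.mp hnd).1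
      have hz : (S.map (fun k => f k * (if k = x then 1 else 0))).sum = 0 := by
        apply List.sum_eq_zero
        intro y hy
        rcases List.mem_map.mp hy with ⟨k, hk, rfl⟩
        have hne : k ≠ x := fun he => hxS (he ▸ hk)
        simp [hne]
      rw [hz]
      simp
    · have hax : a ≠ x := fun he => (List.nodup_cons.mp hnd).1 (he ▸ h)
      rw [ih (List.nodup_cons.mp hnd).2 h]
      simp [hax]

-- summing f over a Nodup support list weighted by multiplicities = summing f over the list
theorem sum_support_count (S : List Int) (xs : List Int) (f : Int → Int)
    (hnd : S.Nodup) (hsub : ∀ x ∈ xs, x ∈ S) :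
    (S.map (fun k => f k * (xs.count k : Int))).sum = (xs.map f).sum := by
  induction xs with
  | nil => simp
  | cons x xs ih =>
    have hx : x ∈ S := hsub x (by simp)
    have hrest : ∀ y ∈ xs, y ∈ S := fun y hy => hsub y (by simp [hy])
    have hsplit : (S.map (fun k => f k * ((x :: xs).count k : Int))).sum
        = (S.map (fun k => f k * (if k = x then 1 else 0))).sum
          + (S.map (fun k => f k * (xs.count k : Int))).sum := by
      rw [← List.sum_map_add]
      apply congrArg
      apply List.map_congr_left
      intro k _
      rw [List.count_cons]
      by_cases h : k = x
      · simp [h]; ring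
      · simp [h, Ne.symm h]
    rw [hsplit, sum_ite_single f x S hnd hx, ih hrest]
    simp

-- B's per-step value over the counter items equals A's per-step value over times
theorem value_eq (times : List Int) (mid : Int) :
    altValue mid (altCounts times).items
      = (times.map (fun x => PySem.Int.floordiv mid x)).sum := by
  have h : altCounts times = PySem.Dict.counter times :=
    PySem.Dict.foldl_insert_getD_add_one_eq_counter times
  rw [altValue, h, PySem.Dict.items_counter, List.map_map]
  have := sum_support_count (PySem.Set.ofList times) times
    (fun t => PySem.Int.floordiv mid t)
    (PySem.Set.nodup_ofList times)
    (fun x hx => by simpa [PySem.Set.mem_ofList] using hx)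
  simpa [Function.comp] using this

-- A's midpoint in (start, end) coordinates equals B's in (start, length) coordinates
theorem mid_eq (s e : Int) :
    PySem.Int.floordiv (s + e) 2 = s + PySem.Int.floordiv (e - s) 2 := by
  rw [PySem.Int.floordiv_eq_ediv_of_pos (by omega), PySem.Int.floordiv_eq_ediv_of_pos (by omega)]
  omega

-- the two searches coincide: B's state (start, length) tracks A's (start, end) via length = end - start
theorem loops_eq (n : Int) (times : List Int) :
    ∀ (fuel : Nat) (s e : Int), (e - s).toNat ≤ fuel →
      solutionBS n times s e = altGo n (altCounts times).items fuel s (e - s) := by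
  intro fuel
  induction fuel with
  | zero =>
    intro s e hk
    rw [solutionBS, altGo]
    exact if_pos (by omega)
  | succ fuel ih =>
    intro s e hk
    by_cases hse : s ≥ e
    · rw [solutionBS, altGo, if_pos hse, if_neg (by omega)]
    · have hlt : s < e := by omega
      have hmb := PySem.Int.floordiv_two_mid_bounds (show s ≤ e by omega)
      have hml : PySem.Int.floordiv (s + e) 2 < e := by
        rw [PySem.Int.floordiv_lt_iff_lt_mul (by omega)]; omega
      have hh : PySem.Int.floordiv (e - s) 2 = PySem.Int.floordiv (s + e) 2 - s := by
        have := mid_eq s e; omega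
      rw [solutionBS, altGo]
      simp only [if_neg hse, if_pos (show (0:Int) < e - s by omega), value_eq, hh]
      have e1 : s + (PySem.Int.floordiv (s + e) 2 - s) = PySem.Int.floordiv (s + e) 2 := by omega
      rw [e1]
      by_cases hv : n = (times.map (fun x => PySem.Int.floordiv (PySem.Int.floordiv (s + e) 2) x)).sum
      · simp [hv]
      · have hv' : ¬((times.map (fun x => PySem.Int.floordiv (PySem.Int.floordiv (s + e) 2) x)).sum = n) :=
          fun h => hv h.symm
        rw [if_neg hv, if_neg hv']
        by_cases hg : n > (times.map (fun x => PySem.Int.floordiv (PySem.Int.floordiv (s + e) 2) x)).sum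
        · have hg' : (times.map (fun x => PySem.Int.floordiv (PySem.Int.floordiv (s + e) 2) x)).sum < n := hg
          rw [if_pos hg, if_pos hg', ih (PySem.Int.floordiv (s + e) 2 + 1) e (by omega)]
          congr 1
          omega
        · have hg' : ¬((times.map (fun x => PySem.Int.floordiv (PySem.Int.floordiv (s + e) 2) x)).sum < n) :=
            fun h => hg h
          rw [if_neg hg, if_neg hg', ih s (PySem.Int.floordiv (s + e) 2 - 1) (by omega)]
          congr 1
          omega

-- ===== VERDICT (by name: the statement is the Claim_ definition above) =====
theorem solution_spec : Claim_equal_solution := by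
  intro n times _ _
  unfold Spec_solution solution solution_alt
  have := loops_eq n times 1000000000 0 1000000000 (by norm_num)
  simpa using this
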